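-- pv_equiv track=rewrite | github.com/stephenchestnut/fbballer | value.py | abs_to_vorp
-- ===== SOURCE A (Python) =====
-- def abs_to_vorp(absval, k, direct=False):
--     #convert "absolute" player values to "value over replacement player"
--     #vorp = abs_to_vorp(absval,k)
--     # - (k+1)st best player is replacement player
--     #vorp = abs_to_vorp(absval,k,direct=True)
--     # - k is the absval score of the replacement player
--
--     if direct:
--         repval=k
--     else:
--         k = min(k,len(absval))
--         srt = list(absval)
--         srt.sort()
--         repval = srt[-k]
--
--     vorp = [x-repval for x in absval]
--     return vorp
-- ===== SOURCE B (Python) =====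
-- def abs_to_vorp(absval, k, direct=False):
--     # value over replacement: subtract the replacement player's score from everyone.
--     # The replacement score is the k-th largest, i.e. the (len-k)-th smallest,
--     # found by quickselect rather than by sorting a copy of the list.
--     if direct:
--         repval = k
--     else:
--         k = min(k, len(absval))
--         repval = _quickselect(absval, len(absval) - k)
--     return [x - repval for x in absval]
--
--
-- def _quickselect(xs, r):
--     """r-th smallest element of xs (0-based)."""
--     while True:
--         p = xs[len(xs) // 2]
--         lt = [x for x in xs if x < p]
--         if r < len(lt):
--             xs = lt
--             continue
--         gt = [x for x in xs if x > p]
--         ne = len(xs) - len(gt)      # number of elements <= p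
--         if r < ne:
--             return p
--         r -= ne
--         xs = gt
-- ===== Notes on version B (the rewrite author's own statement) =====
-- stated objective: alternative
-- what changed: replaces the full sort of a copy plus negative indexing with a quickselect for the replacement value's order statistic (rank len-k); Pre_ excludes non-direct calls with k <= 0 or an empty list, where A either raises IndexError or returns a value produced by accidental negative-index wraparound of srt[-k], and B's quickselect raises IndexError
-- outside the precondition, e.g. on abs_to_vorp([3, 1, 2], 0, False): A returns [2, 0, 1], B raises IndexError
import Mathlib
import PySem

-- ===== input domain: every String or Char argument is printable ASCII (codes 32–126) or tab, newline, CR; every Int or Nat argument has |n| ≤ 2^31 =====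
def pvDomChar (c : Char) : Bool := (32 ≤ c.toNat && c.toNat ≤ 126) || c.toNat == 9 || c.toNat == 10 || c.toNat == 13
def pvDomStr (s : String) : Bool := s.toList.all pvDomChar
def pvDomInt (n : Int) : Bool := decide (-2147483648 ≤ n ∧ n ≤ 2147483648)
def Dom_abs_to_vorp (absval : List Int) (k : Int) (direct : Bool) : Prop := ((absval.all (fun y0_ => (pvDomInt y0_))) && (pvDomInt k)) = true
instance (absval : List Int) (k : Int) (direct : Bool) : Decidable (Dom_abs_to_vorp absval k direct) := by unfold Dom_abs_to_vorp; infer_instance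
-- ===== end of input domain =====

-- B replaces A's full sort + negative indexing by a quickselect for the replacement
-- value's order statistic (objective: alternative algorithm; neither mutates its input).

-- ===== PORT A =====
-- literal port of A: sort a copy, take srt[-k] (Python negative indexing), subtract
def abs_to_vorp (absval : List Int) (k : Int) (direct : Bool) : List Int :=
  if direct then
    absval.map (fun x => x - k)
  else
    let k' := min k (absval.length : Int)
    let srt := PySem.List.sorted absval (fun x => x) false
    match PySem.List.pyGet? srt (-k') with
    | some repval => absval.map (fun x => x - repval)
    | none => []          -- Python raises IndexError here (outside Pre_)

-- ===== PORT B =====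
-- port of Source B's _quickselect: r-th smallest, middle element as pivot
-- (xs[len(xs)//2] is always in range for nonempty xs, so getD is exact)
def qselect : List Int → Nat → Int
  | [], _ => 0            -- Python raises IndexError on xs[len(xs)//2] here (outside Pre_)
  | x :: t, r =>
    let p := (x :: t).getD ((x :: t).length / 2) 0
    let lt := (x :: t).filter (fun y => decide (y < p))
    if hlt : r < lt.length then
      qselect lt r
    else
      let gt := (x :: t).filter (fun y => decide (p < y))
      let ne := (x :: t).length - gt.length
      if r < ne then p
      else qselect gt (r - ne)
termination_by xs _ => xs.length
decreasing_by
  all_goals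
    refine List.length_filter_lt_length_iff_exists.mpr ⟨(x :: t).getD ((x :: t).length / 2) 0, ?_, by simp⟩
    rw [List.getD_eq_getElem _ _ (Nat.div_lt_self (by simp) (by omega))]
    exact List.getElem_mem _

def abs_to_vorp_alt (absval : List Int) (k : Int) (direct : Bool) : List Int :=
  if direct then
    absval.map (fun x => x - k)
  else
    let kk := min k (absval.length : Int)
    let repval := qselect absval ((absval.length : Int) - kk).toNat
    absval.map (fun x => x - repval)

-- ===== PRECONDITION & SPEC =====
-- Pre_ excludes non-direct calls with an empty list or k ≤ 0: there A either raises
-- IndexError (k ≤ -len) or returns a value via accidental negative-index wraparound of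
-- srt[-k] (-len < k ≤ 0), while B's quickselect (rank len-k out of range) raises IndexError.
def Pre_abs_to_vorp (absval : List Int) (k : Int) (direct : Bool) : Prop :=
  direct = true ∨ (absval ≠ [] ∧ 1 ≤ k)
instance (absval : List Int) (k : Int) (direct : Bool) : Decidable (Pre_abs_to_vorp absval k direct) := by unfold Pre_abs_to_vorp; infer_instance
def pvWitness_abs_to_vorp : List Int × Int × Bool := ([3, 1, 4, 1, 5], 2, false)

def Spec_abs_to_vorp (absval : List Int) (k : Int) (direct : Bool) (out : List Int) : Prop := out = abs_to_vorp_alt absval k direct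
instance (absval : List Int) (k : Int) (direct : Bool) (out : List Int) : Decidable (Spec_abs_to_vorp absval k direct out) := by unfold Spec_abs_to_vorp; infer_instance

-- ===== CLAIM (what is proved, stated in full; the proofs are below) =====
def Claim_equal_abs_to_vorp : Prop := ∀ (absval : List Int) (k : Int) (direct : Bool), Dom_abs_to_vorp absval k direct → Pre_abs_to_vorp absval k direct → Spec_abs_to_vorp absval k direct (abs_to_vorp absval k direct)

-- ===== LEMMAS AND PROOFS =====

theorem pv_filter_eq (xs : List Int) (p : Int) : (xs.filter (fun x => !decide (x < p))).filter (fun x => x == p) = xs.filter (fun x => x == p) := by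
  rw [List.filter_filter]
  apply List.filter_congr
  intro x _
  by_cases hlt : x < p <;> by_cases he : x = p <;> simp [hlt, he] <;> try omega

theorem pv_filter_gt (xs : List Int) (p : Int) : (xs.filter (fun x => !decide (x < p))).filter (fun x => !(x == p)) = xs.filter (fun x => decide (p < x)) := by
  rw [List.filter_filter]
  apply List.filter_congr
  intro x _
  by_cases hlt : x < p
  · by_cases he : x = p
    · simp [he]
    · simp [hlt, he]; omega
  · by_cases he : x = p
    · simp [he]
    · have h1 : (x == p) = false := by simp [he]
      have h2 : decide (p < x) = true := by simp; omega
      rw [h1, h2]; simp [hlt]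

theorem sorted_split (xs : List Int) (p : Int) :
    (PySem.List.sorted xs (fun x => x) false) =
      (PySem.List.sorted (xs.filter (fun x => decide (x < p))) (fun x => x) false)
      ++ List.replicate (xs.count p) p
      ++ (PySem.List.sorted (xs.filter (fun x => decide (p < x))) (fun x => x) false) := by
  apply PySem.List.sorted_id_eq_of_perm_of_pairwise
  · have hL := PySem.List.sorted_perm (xs.filter (fun x => decide (x < p))) (fun x => x) false
    have hR := PySem.List.sorted_perm (xs.filter (fun x => decide (p < x))) (fun x => x) false
    have hM : List.replicate (xs.count p) p = xs.filter (fun x => x == p) :=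
      (List.filter_beq (l := xs) p).symm
    have h1 := List.filter_append_perm (fun x => decide (x < p)) xs
    have h2 := List.filter_append_perm (fun x => x == p) (xs.filter (fun x => !decide (x < p)))
    rw [pv_filter_eq, pv_filter_gt] at h2
    have step1 : ((PySem.List.sorted (xs.filter (fun x => decide (x < p))) (fun x => x) false)
          ++ List.replicate (xs.count p) p
          ++ (PySem.List.sorted (xs.filter (fun x => decide (p < x))) (fun x => x) false)).Perm
        (xs.filter (fun x => decide (x < p)) ++ (xs.filter (fun x => x == p) ++ xs.filter (fun x => decide (p < x)))) := by
      rw [List.append_assoc, hM]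
      exact hL.append ((List.Perm.refl _).append hR)
    exact step1.trans ((List.Perm.append_left _ h2).trans h1)
  · simp only [List.pairwise_append, List.mem_append]
    refine ⟨⟨PySem.List.sorted_pairwise _ _, List.pairwise_replicate.mpr (Or.inr (le_refl p)), ?_⟩,
            PySem.List.sorted_pairwise _ _, ?_⟩
    · intro a ha b hb
      rw [PySem.List.mem_sorted, List.mem_filter] at ha
      rw [List.eq_of_mem_replicate hb]
      have := ha.2; simp at this; omega
    · intro a ha b hb
      rw [PySem.List.mem_sorted, List.mem_filter] at hb
      have h2 := hb.2; simp at h2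
      rcases ha with h | h
      · rw [PySem.List.mem_sorted, List.mem_filter] at h
        have h1 := h.2; simp at h1; omega
      · rw [List.eq_of_mem_replicate h]; omega

theorem qselect_sorted : ∀ (n : Nat), ∀ (xs : List Int), xs.length = n →
    ∀ r : Nat, r < xs.length →
      (PySem.List.sorted xs (fun x => x) false)[r]? = some (qselect xs r) := by
  intro n
  induction n using Nat.strong_induction_on with
  | _ n ih =>
    intro xs hn r hr
    match xs with
    | [] => simp at hr
    | x :: t =>
      rw [qselect]
      simp only []
      rw [List.getD_eq_getElem _ _ (Nat.div_lt_self (by simp) (by omega))]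
      generalize hP : (x :: t)[(x :: t).length / 2] = p
      have hp : p ∈ x :: t := hP ▸ List.getElem_mem _
      have hsplit := sorted_split (x :: t) p
      have hLlen : (PySem.List.sorted ((x :: t).filter (fun y => decide (y < p))) (fun y => y) false).length
          = ((x :: t).filter (fun y => decide (y < p))).length := PySem.List.length_sorted _ _ _
      have hRlen : (PySem.List.sorted ((x :: t).filter (fun y => decide (p < y))) (fun y => y) false).length
          = ((x :: t).filter (fun y => decide (p < y))).length := PySem.List.length_sorted _ _ _
      have hlen : (x :: t).length = ((x :: t).filter (fun y => decide (y < p))).length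
          + (x :: t).count p + ((x :: t).filter (fun y => decide (p < y))).length := by
        have h := congrArg List.length hsplit
        rw [PySem.List.length_sorted] at h
        simp only [List.length_append, List.length_replicate, hLlen, hRlen] at h
        omega
      have hltlen : ((x :: t).filter (fun y => decide (y < p))).length < n := by
        have h0 : ((x :: t).filter (fun y => decide (y < p))).length < (x :: t).length :=
          List.length_filter_lt_length_iff_exists.mpr
            ⟨p, hp, fun h => absurd (of_decide_eq_true h) (lt_irrefl p)⟩
        omega
      have hgtlen : ((x :: t).filter (fun y => decide (p < y))).length < n := by
        have h0 : ((x :: t).filter (fun y => decide (p < y))).length < (x :: t).length :=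
          List.length_filter_lt_length_iff_exists.mpr
            ⟨p, hp, fun h => absurd (of_decide_eq_true h) (lt_irrefl p)⟩
        omega
      by_cases hc1 : r < ((x :: t).filter (fun y => decide (y < p))).length
      · rw [dif_pos hc1, hsplit]
        rw [List.getElem?_append_left (by rw [List.length_append, hLlen, List.length_replicate]; omega)]
        rw [List.getElem?_append_left (by rw [hLlen]; omega)]
        exact ih _ hltlen _ rfl r hc1
      · rw [dif_neg hc1]
        by_cases hc2 : r < (x :: t).length - ((x :: t).filter (fun y => decide (p < y))).length
        · rw [if_pos hc2, hsplit]
          rw [List.getElem?_append_left (by rw [List.length_append, hLlen, List.length_replicate]; omega)]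
          rw [List.getElem?_append_right (by rw [hLlen]; omega)]
          rw [hLlen, List.getElem?_replicate]
          rw [if_pos (by omega)]
        · rw [if_neg hc2, hsplit]
          rw [List.getElem?_append_right (by rw [List.length_append, hLlen, List.length_replicate]; omega)]
          rw [List.length_append, hLlen, List.length_replicate]
          have harith : r - (((x :: t).filter (fun y => decide (y < p))).length + (x :: t).count p)
              = r - ((x :: t).length - ((x :: t).filter (fun y => decide (p < y))).length) := by omega
          rw [harith]
          exact ih _ hgtlen _ rfl _ (by omega)

-- ===== VERDICT (by name: the statement is the Claim_ definition above) =====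
theorem abs_to_vorp_spec : Claim_equal_abs_to_vorp := by
  intro absval k direct _ hpre
  unfold Spec_abs_to_vorp abs_to_vorp abs_to_vorp_alt
  cases direct with
  | true => simp
  | false =>
    simp only [Bool.false_eq_true, if_false]
    rcases hpre with h | ⟨hne, hk⟩
    · exact absurd h (by simp)
    have hn1 : 1 ≤ (absval.length : Int) := by
      have := List.length_pos_iff.mpr hne; omega
    have hslen : (PySem.List.sorted absval (fun x => x) false).length = absval.length :=
      PySem.List.length_sorted _ _ _
    set kk := min k (absval.length : Int) with hkk
    have h1 : 1 ≤ kk := le_min hk hn1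
    have hkle : kk ≤ (absval.length : Int) := min_le_right _ _
    have hget : PySem.List.pyGet? (PySem.List.sorted absval (fun x => x) false) (-kk)
        = (PySem.List.sorted absval (fun x => x) false)[absval.length - kk.toNat]? := by
      have hcast : -kk = -((kk.toNat : Int)) := by omega
      rw [hcast, PySem.List.pyGet?_neg_natCast _ kk.toNat (by omega) (by rw [hslen]; omega), hslen]
    have hidx : ((absval.length : Int) - kk).toNat = absval.length - kk.toNat := by omega
    have hlt : absval.length - kk.toNat < absval.length := by omega
    rw [hget, qselect_sorted absval.length absval rfl _ hlt, hidx]
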